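-- pv_equiv track=rewrite | github.com/RaymondSHANG/leecode | test2.py | hashvalue
-- ===== SOURCE A (Python) =====
-- def hashvalue(key):
-- 	key = str(key)
-- 	value = 0
-- 	i = 1
-- 	for cha in key:
-- 		value += ord(cha)*i
-- 		i += 1
-- 	return value
-- ===== SOURCE B (Python) =====
-- def hashvalue(key):
--     key = str(key)
--
--     def go(i):
--         # returns (weighted sum of key[i:], plain ord-sum of key[i:])
--         if i == len(key):
--             return (0, 0)
--         w, s = go(i + 1)
--         o = ord(key[i])
--         return (o + w + s, o + s)
--
--     return go(0)[0]
-- ===== Notes on version B (the rewrite author's own statement) =====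
-- stated objective: alternative
-- what changed: B replaces A's indexed loop with a recursive suffix decomposition returning a pair (weighted sum, plain ord-sum), using the identity weighted(c+rest)=ord(c)+weighted(rest)+sum(rest), so no loop index and no multiplication appear.
import Mathlib
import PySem

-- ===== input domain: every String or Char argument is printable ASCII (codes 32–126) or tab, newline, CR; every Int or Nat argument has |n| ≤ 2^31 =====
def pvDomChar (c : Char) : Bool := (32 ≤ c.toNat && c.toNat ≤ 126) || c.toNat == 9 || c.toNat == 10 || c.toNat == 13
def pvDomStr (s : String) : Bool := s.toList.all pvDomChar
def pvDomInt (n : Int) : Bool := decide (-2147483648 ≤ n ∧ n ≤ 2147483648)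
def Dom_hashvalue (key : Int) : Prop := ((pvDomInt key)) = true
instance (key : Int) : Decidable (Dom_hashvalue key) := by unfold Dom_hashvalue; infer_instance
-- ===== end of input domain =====

-- B replaces A's indexed loop by a recursive suffix decomposition returning
-- (weighted sum, plain ord-sum); same O(n) cost (objective: alternative).

-- ===== PORT A =====
-- value, i accumulated left-to-right; ord(cha)*i added each step, i incremented.
def hashvalue (key : Int) : Int :=
  ((PySem.Int.toStr key).toList.foldl
    (fun (st : Int × Int) c => (st.1 + (c.toNat : Int) * st.2, st.2 + 1)) (0, 1)).1

-- ===== PORT B =====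
-- go: structural recursion on the suffix; fst = weighted sum, snd = plain ord-sum.
def pvGo : List Char → Int × Int
  | [] => (0, 0)
  | c :: t =>
      let ws := pvGo t
      let o : Int := (c.toNat : Int)
      (o + ws.1 + ws.2, o + ws.2)

def hashvalue_alt (key : Int) : Int :=
  (pvGo (PySem.Int.toStr key).toList).1

-- ===== PRECONDITION & SPEC =====
def Spec_hashvalue (key : Int) (out : Int) : Prop := out = hashvalue_alt key
instance (key : Int) (out : Int) : Decidable (Spec_hashvalue key out) := by unfold Spec_hashvalue; infer_instance

-- ===== CLAIM (what is proved, stated in full; the proofs are below) =====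
def Claim_equal_hashvalue : Prop := ∀ (key : Int), Dom_hashvalue key → Spec_hashvalue key (hashvalue key)

-- ===== LEMMAS AND PROOFS =====

theorem pvA_foldl (l : List Char) (v i : Int) :
    (l.foldl (fun (st : Int × Int) c => (st.1 + (c.toNat : Int) * st.2, st.2 + 1)) (v, i)).1
      = v + (pvGo l).1 + (i - 1) * (pvGo l).2 := by
  induction l generalizing v i with
  | nil => simp [pvGo]
  | cons c t ih =>
      simp only [List.foldl_cons, ih, pvGo]
      ring

-- ===== VERDICT (by name: the statement is the Claim_ definition above) =====
theorem hashvalue_spec : Claim_equal_hashvalue := by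
  intro key _
  unfold Spec_hashvalue hashvalue hashvalue_alt
  rw [pvA_foldl]
  ring
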